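-- pv_equiv track=rewrite | github.com/Mingoomato/ProteinScope | proteinscope/analyzers/observable_predictor.py | _mock_trypsin_digest
-- ===== SOURCE A (Python) =====
-- def _mock_trypsin_digest(sequence: str) -> list[str]:
--     """Mock trypsin digest: cleave after K or R, but not if followed by P.
--
--     Returns list of peptide strings.
--
--     Citation: Trypsin specificity: Olsen JV 2004 Mol Cell Proteomics
--     doi:10.1074/mcp.T400003-MCP200
--     """
--     if not sequence:
--         return []
--
--     # Citation: Trypsin specificity (K/R not before P):
--     # Olsen JV 2004 Mol Cell Proteomics doi:10.1074/mcp.T400003-MCP200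
--     peptides: list[str] = []
--     current: list[str] = []
--     seq_upper = sequence.upper()
--
--     for i, aa in enumerate(seq_upper):
--         current.append(aa)
--         if aa in ("K", "R"):
--             # Do not cleave if next residue is P (missed cleavage rule)
--             if i + 1 < len(seq_upper) and seq_upper[i + 1] == "P":
--                 continue
--             peptides.append("".join(current))
--             current = []
--
--     if current:
--         peptides.append("".join(current))
--
--     return [p for p in peptides if p]
-- ===== SOURCE B (Python) =====
-- def _mock_trypsin_digest(sequence: str) -> list[str]:
--     """Mock trypsin digest via an explicit cut-index table instead of a char buffer."""
--     s = sequence.upper()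
--     n = len(s)
--     cuts = [i for i in range(n)
--             if s[i] in ("K", "R") and not (i + 1 < n and s[i + 1] == "P")]
--     pieces = []
--     prev = 0
--     for c in cuts:
--         pieces.append(s[prev:c + 1])
--         prev = c + 1
--     if prev < n:
--         pieces.append(s[prev:])
--     return pieces
-- ===== Notes on version B (the rewrite author's own statement) =====
-- stated objective: alternative
-- what changed: B replaces A's single pass that grows a current-peptide character buffer (flushed at each cleavage site) with a two-phase decomposition: first build an explicit list of cleavage boundary indices by a range filter, then slice the uppercased string between consecutive boundaries.
import Mathlib
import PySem

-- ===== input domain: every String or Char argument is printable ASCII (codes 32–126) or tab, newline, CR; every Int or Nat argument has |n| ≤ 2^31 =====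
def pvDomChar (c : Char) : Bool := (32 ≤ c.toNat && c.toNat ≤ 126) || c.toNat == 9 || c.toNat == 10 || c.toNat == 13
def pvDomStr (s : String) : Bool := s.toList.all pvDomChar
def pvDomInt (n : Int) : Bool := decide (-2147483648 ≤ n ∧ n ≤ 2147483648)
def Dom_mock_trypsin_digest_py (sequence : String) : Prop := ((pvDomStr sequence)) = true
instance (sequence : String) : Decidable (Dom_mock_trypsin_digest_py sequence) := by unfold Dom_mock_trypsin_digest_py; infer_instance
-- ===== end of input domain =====

-- B rebuilds the digest from an explicit cleavage-index table and slices, instead of A's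
-- running character buffer; same O(n) cost, different decomposition (objective: alternative).

-- ===== PORT A =====
-- loop body of A's `for i, aa in enumerate(seq_upper)`; peptides are kept as List Char
-- (Python joins `current` to a str on append; truthiness filter `if p` = nonemptiness)
def pvStepA (su : List Char) (st : List (List Char) × List Char) (p : Int × Char) :
    List (List Char) × List Char :=
  let current := st.2 ++ [p.2]
  if p.2 = 'K' ∨ p.2 = 'R' then
    if p.1 + 1 < PySem.List.len su ∧ PySem.List.pyGet? su (p.1 + 1) = some 'P' then
      (st.1, current)   -- `continue`: missed cleavage before P
    else (st.1 ++ [current], [])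
  else (st.1, current)

def mock_trypsin_digest_py (sequence : String) : List String :=
  if sequence = "" then []
  else
    let su := PySem.Chars.upper sequence.toList
    let r := (PySem.List.enumerate su 0).foldl (pvStepA su) ([], [])
    let peptides := if r.2 ≠ [] then r.1 ++ [r.2] else r.1
    (peptides.filter (fun p => p ≠ [])).map String.ofList

-- ===== PORT B =====
-- B's cut condition at index k: `s[i] in ("K","R") and not (i+1 < n and s[i+1] == "P")`
-- (i and the guarded i+1 are in range, so getD is exact for Python's s[i], s[i+1])
def pvCond (s : List Char) (k : Nat) : Bool :=
  decide ((s.getD k ' ' = 'K' ∨ s.getD k ' ' = 'R') ∧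
    ¬ (k + 1 < s.length ∧ s.getD (k + 1) ' ' = 'P'))

-- loop body of B's `for c in cuts`; state = (pieces, prev)
def pvStepB (s : List Char) (st : List (List Char) × Nat) (c : Nat) :
    List (List Char) × Nat :=
  (st.1 ++ [PySem.List.slice s (some ((st.2 : Nat) : Int)) (some ((c : Int) + 1))], c + 1)

def mock_trypsin_digest_py_alt (sequence : String) : List String :=
  let s := PySem.Chars.upper sequence.toList
  let n := s.length
  let cuts := (List.range n).filter (pvCond s)
  let r := cuts.foldl (pvStepB s) ([], 0)
  let pieces :=
    if r.2 < n then r.1 ++ [PySem.List.slice s (some ((r.2 : Nat) : Int)) (some ((n : Nat) : Int))]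
    else r.1
  pieces.map String.ofList

-- ===== PRECONDITION & SPEC =====
def Spec_mock_trypsin_digest_py (sequence : String) (out : List String) : Prop := out = mock_trypsin_digest_py_alt sequence
instance (sequence : String) (out : List String) : Decidable (Spec_mock_trypsin_digest_py sequence out) := by unfold Spec_mock_trypsin_digest_py; infer_instance

-- ===== CLAIM (what is proved, stated in full; the proofs are below) =====
def Claim_equal_mock_trypsin_digest_py : Prop := ∀ (sequence : String), Dom_mock_trypsin_digest_py sequence → Spec_mock_trypsin_digest_py sequence (mock_trypsin_digest_py sequence)

-- ===== LEMMAS AND PROOFS =====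

-- reference recursion: digest the suffix t, with cur the peptide accumulated so far
def pvGo (t : List Char) (cur : List Char) : List (List Char) :=
  match t with
  | [] => if cur = [] then [] else [cur]
  | a :: rest =>
    if a = 'K' ∨ a = 'R' then
      if rest.head? = some 'P' then pvGo rest (cur ++ [a])
      else (cur ++ [a]) :: pvGo rest []
    else pvGo rest (cur ++ [a])

lemma pvGo_ne_nil : ∀ (t cur : List Char), ∀ x ∈ pvGo t cur, x ≠ [] := by
  intro t
  induction t with
  | nil =>
    intro cur x hx
    by_cases h : cur = [] <;> simp [pvGo, h] at hx
    · simpa [hx] using h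
  | cons a rest ih =>
    intro cur x hx
    by_cases hkr : a = 'K' ∨ a = 'R'
    · by_cases hp : rest.head? = some 'P'
      · exact ih _ x (by simpa [pvGo, hkr, hp] using hx)
      · rcases (by simpa [pvGo, hkr, hp] using hx : x = cur ++ [a] ∨ x ∈ pvGo rest []) with h | h
        · simp [h]
        · exact ih _ x h
    · exact ih _ x (by simpa [pvGo, hkr] using hx)

-- A's loop computes pvGo: fold over the enumerated suffix, then flush the buffer
lemma pvFoldA (s : List Char) :
    ∀ (t : List Char) (k : Nat) (peps : List (List Char)) (cur : List Char),
      s.drop k = t →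
      (let r := (PySem.List.enumerate t (k : Int)).foldl (pvStepA s) (peps, cur)
       if r.2 ≠ [] then r.1 ++ [r.2] else r.1) = peps ++ pvGo t cur := by
  intro t
  induction t with
  | nil =>
    intro k peps cur _
    by_cases h : cur = [] <;> simp [PySem.List.enumerate_nil, pvGo, h]
  | cons a rest ih =>
    intro k peps cur hdrop
    have hk : k < s.length := by
      by_contra h
      simp [List.drop_eq_nil_of_le (Nat.le_of_not_lt h)] at hdrop
    have hrest : s.drop (k + 1) = rest := by
      have h1 : (s.drop k).drop 1 = rest := by rw [hdrop]; rfl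
      rwa [List.drop_drop] at h1
    have hnext : s[k + 1]? = rest.head? := by
      have h1 : (s.drop k)[1]? = s[k + 1]? := by
        rw [List.getElem?_drop]
      rw [hdrop] at h1
      rw [← h1]
      simp [List.head?_eq_getElem?]
    have hcond : ((k : Int) + 1 < PySem.List.len s ∧ PySem.List.pyGet? s ((k : Int) + 1) = some 'P')
        ↔ rest.head? = some 'P' := by
      have hget : PySem.List.pyGet? s ((k : Int) + 1) = s[k + 1]? := by
        have : (k : Int) + 1 = ((k + 1 : Nat) : Int) := by push_cast; ring
        rw [this, PySem.List.pyGet?_natCast]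
      constructor
      · rintro ⟨-, h2⟩; rw [← hnext, ← hget]; exact h2
      · intro h
        have hlt : k + 1 < s.length := by
          rw [← hnext] at h
          obtain ⟨hh, -⟩ := List.getElem?_eq_some_iff.mp h
          exact hh
        refine ⟨by simp [PySem.List.len_eq]; exact_mod_cast hlt, ?_⟩
        rw [hget, hnext]; exact h
    rw [PySem.List.enumerate_cons]
    by_cases hkr : a = 'K' ∨ a = 'R'
    · by_cases hp : rest.head? = some 'P'
      · have : pvStepA s (peps, cur) ((k : Int), a) = (peps, cur ++ [a]) := by
          simp only [pvStepA, if_pos hkr]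
          rw [if_pos (hcond.mpr hp)]
        rw [List.foldl_cons, this, show (k : Int) + 1 = ((k + 1 : Nat) : Int) by push_cast; ring,
          ih (k + 1) peps (cur ++ [a]) hrest]
        simp [pvGo, hkr, hp]
      · have : pvStepA s (peps, cur) ((k : Int), a) = (peps ++ [cur ++ [a]], []) := by
          simp only [pvStepA, if_pos hkr]
          rw [if_neg (by rw [hcond]; exact hp)]
        rw [List.foldl_cons, this, show (k : Int) + 1 = ((k + 1 : Nat) : Int) by push_cast; ring,
          ih (k + 1) (peps ++ [cur ++ [a]]) [] hrest]
        simp [pvGo, hkr, hp]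
    · have : pvStepA s (peps, cur) ((k : Int), a) = (peps, cur ++ [a]) := by
        simp [pvStepA, hkr]
      rw [List.foldl_cons, this, show (k : Int) + 1 = ((k + 1 : Nat) : Int) by push_cast; ring,
        ih (k + 1) peps (cur ++ [a]) hrest]
      simp [pvGo, hkr]

-- B's cut-fold-then-slice computes pvGo: cur is exactly the slice s[prev:k]
lemma pvFoldB (s : List Char) :
    ∀ (t : List Char) (k prev : Nat) (pieces : List (List Char)),
      s.drop k = t → prev ≤ k →
      (let r := ((List.range' k (s.length - k)).filter (pvCond s)).foldl (pvStepB s) (pieces, prev)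
       if r.2 < s.length then
         r.1 ++ [PySem.List.slice s (some ((r.2 : Nat) : Int)) (some ((s.length : Nat) : Int))]
       else r.1)
      = pieces ++ pvGo t ((s.drop prev).take (k - prev)) := by
  intro t
  induction t with
  | nil =>
    intro k prev pieces hdrop hpk
    have hk : s.length ≤ k := by
      by_contra h
      have : s.drop k ≠ [] := by
        simp [List.drop_eq_nil_iff]; omega
      exact this hdrop
    have hr : s.length - k = 0 := by omega
    have hcur : (s.drop prev).take (k - prev) = s.drop prev := by
      apply List.take_of_length_le
      simp; omega
    rw [hr]
    simp only [List.range'_zero, List.filter_nil, List.foldl_nil]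
    by_cases hpn : prev < s.length
    · have hne : s.drop prev ≠ [] := by simp [List.drop_eq_nil_iff]; omega
      simp only [if_pos hpn, hcur, pvGo, if_neg hne]
      rw [PySem.List.slice_natCast]
      congr 2
      exact List.take_of_length_le (by simp)
    · have hnil : s.drop prev = [] := List.drop_eq_nil_of_le (by omega)
      simp [hpn, hnil, pvGo]
  | cons a rest ih =>
    intro k prev pieces hdrop hpk
    have hk : k < s.length := by
      by_contra h
      simp [List.drop_eq_nil_of_le (Nat.le_of_not_lt h)] at hdrop
    have hrest : s.drop (k + 1) = rest := by
      have h1 : (s.drop k).drop 1 = rest := by rw [hdrop]; rfl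
      rwa [List.drop_drop] at h1
    have ha : s[k]? = some a := by
      have h0 : (s.drop k)[0]? = s[k]? := by
        simp
      rw [hdrop] at h0
      simpa using h0.symm
    have haD : s.getD k ' ' = a := by
      rw [List.getD_eq_getElem?_getD, ha]
      rfl
    have hnext : s[k + 1]? = rest.head? := by
      have h1 : (s.drop k)[1]? = s[k + 1]? := by
        rw [List.getElem?_drop]
      rw [hdrop] at h1
      rw [← h1]
      simp [List.head?_eq_getElem?]
    have hgetD1 : ∀ (h1 : k + 1 < s.length), s.getD (k + 1) ' ' = s[k + 1] := by
      intro h1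
      rw [List.getD_eq_getElem?_getD, List.getElem?_eq_getElem h1]
      rfl
    have hcondP : (k + 1 < s.length ∧ s.getD (k + 1) ' ' = 'P') ↔ rest.head? = some 'P' := by
      constructor
      · rintro ⟨h1, h2⟩
        rw [hgetD1 h1] at h2
        rw [← hnext, List.getElem?_eq_getElem h1, h2]
      · intro h
        have hlt : k + 1 < s.length := by
          rw [← hnext] at h
          obtain ⟨hh, -⟩ := List.getElem?_eq_some_iff.mp h
          exact hh
        refine ⟨hlt, ?_⟩
        rw [hgetD1 hlt]
        rw [← hnext, List.getElem?_eq_getElem hlt] at h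
        exact Option.some.inj h
    have hrange : List.range' k (s.length - k) = k :: List.range' (k + 1) (s.length - (k + 1)) := by
      have : s.length - k = (s.length - (k + 1)) + 1 := by omega
      rw [this, List.range'_succ]
    have hsliceA : ∀ m, prev ≤ m → m < s.length → s[m]? = some a →
        (s.drop prev).take (m + 1 - prev) = (s.drop prev).take (m - prev) ++ [a] := by
      intro m hm hms hma
      have : m + 1 - prev = (m - prev) + 1 := by omega
      rw [this, List.take_add_one]
      congr 1
      have : (s.drop prev)[m - prev]? = s[prev + (m - prev)]? := List.getElem?_drop ..
      rw [show prev + (m - prev) = m by omega] at this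
      simp [this, hma]
    rw [hrange]
    by_cases hc : pvCond s k = true
    · -- cut at k
      have h2 := hc
      unfold pvCond at h2
      rw [haD] at h2
      simp only [decide_eq_true_eq] at h2
      have hkr : a = 'K' ∨ a = 'R' := h2.1
      have hp : ¬ rest.head? = some 'P' := fun hcon => h2.2 (hcondP.mpr hcon)
      simp only [List.filter_cons, hc, if_pos, List.foldl_cons]
      have hstep : pvStepB s (pieces, prev) k =
          (pieces ++ [(s.drop prev).take (k + 1 - prev)], k + 1) := by
        simp only [pvStepB]
        rw [show (k : Int) + 1 = ((k + 1 : Nat) : Int) by push_cast; ring,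
          PySem.List.slice_natCast]
      rw [hstep]
      have := ih (k + 1) (k + 1) (pieces ++ [(s.drop prev).take (k + 1 - prev)]) hrest (le_refl _)
      simp only [Nat.sub_self, List.take_zero] at this
      rw [this, hsliceA k hpk hk ha]
      simp [pvGo, hkr, hp]
    · -- no cut at k
      have hnc : ¬ ((a = 'K' ∨ a = 'R') ∧ ¬ rest.head? = some 'P') := by
        intro hcon
        apply hc
        unfold pvCond
        rw [haD]
        simp only [decide_eq_true_eq]
        exact ⟨hcon.1, fun h12 => hcon.2 (hcondP.mp h12)⟩
      simp only [List.filter_cons, hc, if_neg, Bool.false_eq_true, not_false_iff]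
      rw [ih (k + 1) prev pieces hrest (by omega)]
      rw [hsliceA k hpk hk ha]
      by_cases hkr : a = 'K' ∨ a = 'R'
      · have hp : rest.head? = some 'P' := by
          by_contra h
          exact hnc ⟨hkr, h⟩
        simp [pvGo, hkr, hp]
      · simp [pvGo, hkr]

-- ===== VERDICT (by name: the statement is the Claim_ definition above) =====
theorem mock_trypsin_digest_py_spec : Claim_equal_mock_trypsin_digest_py := by
  intro sequence _
  unfold Spec_mock_trypsin_digest_py mock_trypsin_digest_py mock_trypsin_digest_py_alt
  by_cases hseq : sequence = ""
  · subst hseq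
    simp [PySem.Chars.upper]
  · simp only [if_neg hseq]
    have hA := pvFoldA (PySem.Chars.upper sequence.toList) (PySem.Chars.upper sequence.toList)
      0 [] [] (by simp)
    have hB := pvFoldB (PySem.Chars.upper sequence.toList) (PySem.Chars.upper sequence.toList)
      0 0 [] (by simp) (le_refl _)
    simp only [Nat.cast_zero, Nat.sub_zero, List.take_zero, List.nil_append,
      ← List.range_eq_range'] at hA hB
    rw [hA]
    have hfilter : ((pvGo (PySem.Chars.upper sequence.toList) []).filter (fun p => p ≠ [])) =
        pvGo (PySem.Chars.upper sequence.toList) [] := by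
      apply List.filter_eq_self.mpr
      intro x hx
      simpa using pvGo_ne_nil (PySem.Chars.upper sequence.toList) [] x hx
    rw [hfilter, ← hB]
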